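-- pv_equiv track=rewrite | github.com/Wolff-H/COMP-3-201 | Assignments/a6/survivorSelection.py | mu_plus_lambda
-- ===== SOURCE A (Python) =====
-- def mu_plus_lambda(current_pop, current_fitness, offspring, offspring_fitness):
--     population = []
--     fitness = []
--
--     # joint parents and offspring #
--     all_individuals = []
--     all_individuals.extend(current_pop)
--     all_individuals.extend(offspring)
--     all_fitness = []
--     all_fitness.extend(current_fitness)
--     all_fitness.extend(offspring_fitness)
--
--     # dict { index: [layout,fitness] } #
--     i_with_info = {}
--     for i in range( len(all_individuals) ) :
--         i_with_info[i] = [ all_individuals[i], all_fitness[i] ]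
--
--     # i_with_info ranked by item.fitness #
--     ranked_i_with_info = sorted(i_with_info.items(), key=lambda item: item[1][1], reverse=True)
--
--     # μ+λ #
--     for i in range( len(current_pop) ) :
--         population.append(ranked_i_with_info[i][1][0])
--         fitness.append(ranked_i_with_info[i][1][1])
--
--     # student code end
--
--     return population, fitness
-- ===== SOURCE B (Python) =====
-- def mu_plus_lambda(current_pop, current_fitness, offspring, offspring_fitness):
--     # One pass with a bounded sorted buffer of the current top-mu (fitness, individual)
--     # pairs, instead of building a dict over everything and fully sorting it.
--     mu = len(current_pop)
--     individuals = current_pop + offspring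
--     fitnesses = current_fitness + offspring_fitness
--     best = []  # at most mu entries, ordered by fitness desc, ties by arrival order
--     for i in range(len(individuals)):
--         f = fitnesses[i]
--         pos = len(best)
--         while pos > 0 and best[pos - 1][0] < f:
--             pos -= 1
--         if pos < mu:
--             best.insert(pos, (f, individuals[i]))
--             if len(best) > mu:
--                 best.pop()
--     return [e[1] for e in best], [e[0] for e in best]
-- ===== Notes on version B (the rewrite author's own statement) =====
-- stated objective: alternative
-- what changed: A concatenates everything into an index-keyed dict, fully sorts all n items by fitness (descending, stable) and takes the first mu; B makes a single pass over the combined population maintaining a sorted buffer of at most mu (fitness, individual) pairs by bounded insertion, so no dict and no full sort are built.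
import Mathlib
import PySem

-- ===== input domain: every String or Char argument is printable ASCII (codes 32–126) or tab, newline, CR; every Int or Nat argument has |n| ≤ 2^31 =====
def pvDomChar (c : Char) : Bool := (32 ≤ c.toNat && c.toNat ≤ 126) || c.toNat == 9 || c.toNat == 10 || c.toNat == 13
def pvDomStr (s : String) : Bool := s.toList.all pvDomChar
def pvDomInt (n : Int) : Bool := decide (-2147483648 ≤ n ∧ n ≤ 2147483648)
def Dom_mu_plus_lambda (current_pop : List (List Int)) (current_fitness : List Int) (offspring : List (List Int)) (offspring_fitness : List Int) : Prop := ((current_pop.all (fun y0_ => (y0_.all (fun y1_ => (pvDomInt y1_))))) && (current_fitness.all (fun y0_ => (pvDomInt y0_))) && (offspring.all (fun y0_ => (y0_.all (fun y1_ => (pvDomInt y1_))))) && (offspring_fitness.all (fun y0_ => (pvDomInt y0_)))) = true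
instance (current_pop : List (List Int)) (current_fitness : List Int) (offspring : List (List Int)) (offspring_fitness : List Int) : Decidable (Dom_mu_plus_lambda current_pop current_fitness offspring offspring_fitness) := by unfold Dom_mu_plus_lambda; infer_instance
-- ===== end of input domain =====

-- B replaces A's dict-over-everything + full sort by a single pass maintaining a bounded
-- sorted buffer of the current top-mu (fitness, individual) pairs (objective: alternative).

-- ===== PORT A =====
-- the dict build and the output loop index with all_fitness[i] / ranked[i]; the fallible
-- lookups are threaded through Option (none = IndexError, excluded by Pre_).
def mu_plus_lambda (current_pop : List (List Int)) (current_fitness : List Int) (offspring : List (List Int)) (offspring_fitness : List Int) : List (List Int) × List Int :=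
  let all_individuals := ([] : List (List Int)) ++ current_pop ++ offspring
  let all_fitness := ([] : List Int) ++ current_fitness ++ offspring_fitness
  -- for i in range(len(all_individuals)): i_with_info[i] = [all_individuals[i], all_fitness[i]]
  -- (the Python two-element value list [layout, fitness] is ported as the pair (layout, fitness))
  let i_with_info? : Option (PySem.Dict Int (List Int × Int)) :=
    (PySem.List.pyRange 0 (PySem.List.len all_individuals) 1).foldl
      (fun acc i => acc.bind fun d =>
        (PySem.List.pyGet? all_individuals i).bind fun ind =>
        (PySem.List.pyGet? all_fitness i).map fun f => d.insert i (ind, f))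
      (some PySem.Dict.empty)
  match i_with_info? with
  | none => ([], [])  -- IndexError in the dict loop: outside Pre_
  | some i_with_info =>
    let ranked := PySem.List.sorted i_with_info.items (fun item => item.2.2) true
    -- for i in range(len(current_pop)): population.append(ranked[i][1][0]); fitness.append(ranked[i][1][1])
    let res? : Option (List (List Int) × List Int) :=
      (PySem.List.pyRange 0 (PySem.List.len current_pop) 1).foldl
        (fun acc i => acc.bind fun pf =>
          (PySem.List.pyGet? ranked i).map fun it => (pf.1 ++ [it.2.1], pf.2 ++ [it.2.2]))
        (some (([] : List (List Int)), ([] : List Int)))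
    match res? with
    | none => ([], [])  -- unreachable when the dict loop succeeded
    | some res => res

-- ===== PORT B =====
-- while pos > 0 and best[pos - 1][0] < f: pos -= 1   (best[pos-1] is always in range there,
-- so the total pyGetD is exact for that subscript)
def bFindPos (best : List (Int × List Int)) (f : Int) : Nat → Nat
  | 0 => 0
  | p + 1 => if (PySem.List.pyGetD best ((p : Nat) : Int) (0, [])).1 < f then bFindPos best f p else p + 1

-- the body of B's loop: bounded insertion, then best.pop() when the buffer exceeds mu
-- (pop() on a nonempty list, result discarded, is dropLast)
def bStep (mu : Nat) (best : List (Int × List Int)) (e : Int × List Int) : List (Int × List Int) :=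
  let pos := bFindPos best e.1 best.length
  if pos < mu then
    let best' := PySem.List.insert best ((pos : Nat) : Int) e
    if mu < best'.length then best'.dropLast else best'
  else best

def mu_plus_lambda_alt (current_pop : List (List Int)) (current_fitness : List Int) (offspring : List (List Int)) (offspring_fitness : List Int) : List (List Int) × List Int :=
  let mu := current_pop.length
  let individuals := current_pop ++ offspring
  let fitnesses := current_fitness ++ offspring_fitness
  let best :=
    (PySem.List.pyRange 0 (PySem.List.len individuals) 1).foldl
      (fun best i =>
        match PySem.List.pyGet? fitnesses i with
        | none => best  -- f = fitnesses[i] raises IndexError in Python: outside Pre_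
        | some f => bStep mu best (f, PySem.List.pyGetD individuals i []))
      []
  (best.map (fun e => e.2), best.map (fun e => e.1))

-- ===== PRECONDITION & SPEC =====
-- Pre_ excludes exactly the inputs where the Python A raises IndexError (combined fitness
-- list shorter than the combined population; B raises there as well).
def Pre_mu_plus_lambda (current_pop : List (List Int)) (current_fitness : List Int) (offspring : List (List Int)) (offspring_fitness : List Int) : Prop :=
  current_pop.length + offspring.length ≤ current_fitness.length + offspring_fitness.length
instance (current_pop : List (List Int)) (current_fitness : List Int) (offspring : List (List Int)) (offspring_fitness : List Int) : Decidable (Pre_mu_plus_lambda current_pop current_fitness offspring offspring_fitness) := by unfold Pre_mu_plus_lambda; infer_instance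

def pvWitness_mu_plus_lambda : List (List Int) × List Int × List (List Int) × List Int :=
  ([[1], [2]], [5, 3], [[7]], [9])

def Spec_mu_plus_lambda (current_pop : List (List Int)) (current_fitness : List Int) (offspring : List (List Int)) (offspring_fitness : List Int) (out : List (List Int) × List Int) : Prop := out = mu_plus_lambda_alt current_pop current_fitness offspring offspring_fitness
instance (current_pop : List (List Int)) (current_fitness : List Int) (offspring : List (List Int)) (offspring_fitness : List Int) (out : List (List Int) × List Int) : Decidable (Spec_mu_plus_lambda current_pop current_fitness offspring offspring_fitness out) := by unfold Spec_mu_plus_lambda; infer_instance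

-- ===== CLAIM (what is proved, stated in full; the proofs are below) =====
def Claim_equal_mu_plus_lambda : Prop := ∀ (current_pop : List (List Int)) (current_fitness : List Int) (offspring : List (List Int)) (offspring_fitness : List Int), Dom_mu_plus_lambda current_pop current_fitness offspring offspring_fitness → Pre_mu_plus_lambda current_pop current_fitness offspring offspring_fitness → Spec_mu_plus_lambda current_pop current_fitness offspring offspring_fitness (mu_plus_lambda current_pop current_fitness offspring offspring_fitness)

-- ===== LEMMAS AND PROOFS =====

-- the comparisons sorted(·, reverse=True) inserts with, on B-side / A-side element types
def befB : (Int × List Int) → (Int × List Int) → Bool := fun a b => decide (b.1 < a.1)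
def befA : (Int × (List Int × Int)) → (Int × (List Int × Int)) → Bool := fun a b => decide (b.2.2 < a.2.2)

-- the item list of A's index dict
def aItems (inds : List (List Int)) (fits : List Int) : List (Int × (List Int × Int)) :=
  (List.range inds.length).map (fun (k : Nat) => ((k : Int), (inds.getD k [], fits.getD k 0)))

def hconv (it : Int × (List Int × Int)) : Int × List Int := (it.2.2, it.2.1)

-- number of buffer entries ranked no worse than fitness f (the insertion position)
def pvP (S : List (Int × List Int)) (f : Int) : Nat :=
  (S.takeWhile (fun y => decide (f ≤ y.1))).length

lemma pvP_le (S : List (Int × List Int)) (f : Int) : pvP S f ≤ S.length :=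
  (List.takeWhile_prefix _).length_le

lemma pvInsert_eq {α : Type} (xs : List α) (p : Nat) (h : p ≤ xs.length) (v : α) :
    PySem.List.insert xs (p : Int) v = xs.take p ++ v :: xs.drop p := by
  have h0 : ¬ ((p : Int) < 0) := by omega
  have h1 : min (p : Int) (xs.length : Int) = (p : Int) := by omega
  simp [PySem.List.insert, PySem.List.sliceIndices, h0, h1]

lemma insertBy_take_drop (S : List (Int × List Int)) (e : Int × List Int) :
    PySem.List.insertBy befB e S = S.take (pvP S e.1) ++ e :: S.drop (pvP S e.1) := by
  induction S with
  | nil => simp [PySem.List.insertBy, pvP]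
  | cons y ys ih =>
    by_cases hb : befB e y = true
    · have hy : y.1 < e.1 := by simpa [befB] using hb
      have hP : pvP (y :: ys) e.1 = 0 := by
        simp [pvP, show ¬ (e.1 ≤ y.1) by omega]
      simp [PySem.List.insertBy, hb, hP]
    · have hy : e.1 ≤ y.1 := by
        have hb' : ¬ (y.1 < e.1) := by simpa [befB] using hb
        omega
      have hP : pvP (y :: ys) e.1 = pvP ys e.1 + 1 := by
        simp [pvP, hy]
      simp [PySem.List.insertBy, hb, hP, ih]

lemma bFindPos_append (T : List (Int × List Int)) (y : Int × List Int) (f : Int) (p : Nat)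
    (hp : p ≤ T.length) : bFindPos (T ++ [y]) f p = bFindPos T f p := by
  induction p with
  | zero => rfl
  | succ q ih =>
    have hq : q < T.length := by omega
    simp only [bFindPos, PySem.List.pyGetD_natCast, List.getD_append _ _ _ q hq]
    rw [ih (by omega)]

lemma pvP_snoc_neg (S : List (Int × List Int)) (y : Int × List Int) (f : Int) (hy : y.1 < f) :
    pvP (S ++ [y]) f = pvP S f := by
  induction S with
  | nil => simp [pvP, show ¬ (f ≤ y.1) by omega]
  | cons a S ih =>
    by_cases ha : f ≤ a.1
    · simp only [pvP, List.cons_append, List.takeWhile_cons, decide_eq_true_eq] at *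
      simp [ha, ih]
    · simp [pvP, ha]

lemma pvP_snoc_pos (S : List (Int × List Int)) (y : Int × List Int) (f : Int) (hy : f ≤ y.1)
    (hall : ∀ a ∈ S, y.1 ≤ a.1) : pvP (S ++ [y]) f = S.length + 1 := by
  have hw : (S ++ [y]).takeWhile (fun z => decide (f ≤ z.1)) = S ++ [y] := by
    rw [List.takeWhile_eq_self_iff]
    intro x hx
    rcases List.mem_append.1 hx with hx | hx
    · have := hall x hx; simp; omega
    · simp at hx; subst hx; simpa using hy
  simp [pvP, hw]

lemma bFindPos_sorted (T : List (Int × List Int)) (hs : T.Pairwise (fun a b => b.1 ≤ a.1))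
    (f : Int) : bFindPos T f T.length = pvP T f := by
  induction T using List.reverseRecOn with
  | nil => simp [bFindPos, pvP]
  | append_singleton T y ih =>
    have hsT : T.Pairwise (fun a b => b.1 ≤ a.1) := hs.sublist (by simp)
    have hall : ∀ a ∈ T, y.1 ≤ a.1 := by
      rw [List.pairwise_append] at hs
      intro a ha; exact hs.2.2 a ha y (by simp)
    have hlen : (T ++ [y]).length = T.length + 1 := by simp
    rw [hlen]
    have hget : (T ++ [y]).getD T.length (0, []) = y := by
      rw [List.getD_eq_getElem _ _ (by simp)]
      exact List.getElem_concat_length rfl _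
    by_cases hy : y.1 < f
    · have hstep : bFindPos (T ++ [y]) f (T.length + 1) = bFindPos (T ++ [y]) f T.length := by
        simp only [bFindPos, PySem.List.pyGetD_natCast, hget, if_pos hy]
      rw [hstep, bFindPos_append T y f T.length le_rfl, ih hsT, pvP_snoc_neg T y f hy]
    · have hstep : bFindPos (T ++ [y]) f (T.length + 1) = T.length + 1 := by
        simp only [bFindPos, PySem.List.pyGetD_natCast, hget, if_neg hy]
      rw [hstep, pvP_snoc_pos T y f (by omega) hall]

-- one B-loop step on the truncated buffer = truncation of one full sorted insertion
lemma bStep_core (mu : Nat) (S : List (Int × List Int))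
    (hs : S.Pairwise (fun a b => b.1 ≤ a.1)) (e : Int × List Int) :
    bStep mu (S.take mu) e = (PySem.List.insertBy befB e S).take mu := by
  have hTs : (S.take mu).Pairwise (fun a b => b.1 ≤ a.1) := hs.sublist (List.take_sublist _ _)
  have hPle : pvP S e.1 ≤ S.length := pvP_le S e.1
  have hPT : pvP (S.take mu) e.1 = min mu (pvP S e.1) := by
    rw [pvP, ← List.take_takeWhile, List.length_take]; rfl
  have hpos : bFindPos (S.take mu) e.1 (S.take mu).length = min mu (pvP S e.1) := by
    rw [bFindPos_sorted _ hTs, hPT]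
  set P := pvP S e.1 with hPdef
  rw [insertBy_take_drop]
  by_cases hcase : P < mu
  · have hmin : min mu P = P := by omega
    have hPleT : P ≤ (S.take mu).length := by rw [List.length_take]; omega
    have hins : PySem.List.insert (S.take mu) ((P : Nat) : Int) e
        = S.take P ++ e :: (S.drop P).take (mu - P) := by
      rw [pvInsert_eq _ P hPleT, List.take_take, Nat.min_eq_left (by omega), List.drop_take]
    have hRHS : (S.take P ++ e :: S.drop P).take mu
        = S.take P ++ e :: (S.drop P).take (mu - P - 1) := by
      rw [List.take_append, List.take_of_length_le (by rw [List.length_take]; omega),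
          List.length_take, Nat.min_eq_left (by omega),
          show mu - P = (mu - P - 1) + 1 by omega, List.take_succ_cons]
      simp
    rw [bStep, hpos, hmin, if_pos hcase, hins, hRHS]
    by_cases hS : mu ≤ S.length
    · have hlen' : (S.take P ++ e :: (S.drop P).take (mu - P)).length = mu + 1 := by
        simp [List.length_take, List.length_drop]; omega
      rw [if_pos (by omega), List.dropLast_eq_take, hlen']
      simp only [Nat.add_sub_cancel]
      rw [List.take_append, List.take_of_length_le (by rw [List.length_take]; omega),
          List.length_take, Nat.min_eq_left (by omega),
          show mu - P = (mu - P - 1) + 1 by omega, List.take_succ_cons, List.take_take,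
          Nat.min_eq_left (by omega)]
      simp
    · have hSl : S.length < mu := by omega
      have h1 : (S.drop P).take (mu - P) = S.drop P :=
        List.take_of_length_le (by rw [List.length_drop]; omega)
      have h2 : (S.drop P).take (mu - P - 1) = S.drop P :=
        List.take_of_length_le (by rw [List.length_drop]; omega)
      have hlen' : (S.take P ++ e :: (S.drop P).take (mu - P)).length = S.length + 1 := by
        simp [List.length_take, List.length_drop]; omega
      rw [if_neg (by omega), h1, h2]
  · have hmin : min mu P = mu := by omega
    rw [bStep, hpos, hmin, if_neg (by omega)]
    rw [List.take_append, List.take_take, Nat.min_eq_left (by omega)]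
    have h0 : mu - (S.take P).length = 0 := by rw [List.length_take]; omega
    rw [h0, List.take_zero, List.append_nil]

-- B's whole loop computes the mu-prefix of the reverse-sorted entry list
lemma bMain (mu : Nat) (xs : List (Int × List Int)) :
    xs.foldl (bStep mu) [] = (PySem.List.sorted xs (fun e => e.1) true).take mu := by
  induction xs using List.reverseRecOn with
  | nil => simp [PySem.List.sorted_rev_eq_foldl_insertBy]
  | append_singleton xs e ih =>
    rw [List.foldl_append, List.foldl_cons, List.foldl_nil, ih,
        bStep_core mu _ (PySem.List.sorted_pairwise_rev xs (fun e => e.1)) e,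
        PySem.List.sorted_rev_eq_foldl_insertBy, PySem.List.sorted_rev_eq_foldl_insertBy,
        List.foldl_append, List.foldl_cons, List.foldl_nil]
    rfl

lemma insertBy_map (x : Int × (List Int × Int)) (l : List (Int × (List Int × Int))) :
    PySem.List.insertBy befB (hconv x) (l.map hconv) = (PySem.List.insertBy befA x l).map hconv := by
  induction l with
  | nil => simp [PySem.List.insertBy]
  | cons y ys ih =>
    have hbb : befB (hconv x) (hconv y) = befA x y := by simp [befA, befB, hconv]
    by_cases hb : befA x y = true
    · simp [PySem.List.insertBy, hb, hbb]
    · simp only [Bool.not_eq_true] at hb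
      simp [PySem.List.insertBy, hb, hbb, ih]

lemma sorted_map_hconv (l : List (Int × (List Int × Int))) :
    PySem.List.sorted (l.map hconv) (fun e => e.1) true
      = (PySem.List.sorted l (fun it => it.2.2) true).map hconv := by
  rw [PySem.List.sorted_rev_eq_foldl_insertBy, PySem.List.sorted_rev_eq_foldl_insertBy,
      List.foldl_map]
  have main : ∀ (l : List (Int × (List Int × Int))) (acc : List (Int × (List Int × Int))),
      l.foldl (fun a x => PySem.List.insertBy befB (hconv x) a) (acc.map hconv)
        = (l.foldl (fun a x => PySem.List.insertBy befA x a) acc).map hconv := by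
    intro l
    induction l with
    | nil => intro acc; rfl
    | cons y ys ih =>
      intro acc
      rw [List.foldl_cons, List.foldl_cons, insertBy_map, ih]
  simpa using main l []

lemma optDictFold (inds : List (List Int)) (fits : List Int) (l : List Int)
    (hl : ∀ i ∈ l, 0 ≤ i ∧ i.toNat < inds.length ∧ i.toNat < fits.length) :
    ∀ d : PySem.Dict Int (List Int × Int),
    l.foldl (fun acc i => acc.bind fun d =>
        (PySem.List.pyGet? inds i).bind fun ind =>
        (PySem.List.pyGet? fits i).map fun f => d.insert i (ind, f)) (some d)
    = some (l.foldl (fun d i => d.insert i (inds.getD i.toNat [], fits.getD i.toNat 0)) d) := by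
  induction l with
  | nil => intro d; rfl
  | cons i t ih =>
    intro d
    obtain ⟨h0, h1, h2⟩ := hl i (by simp)
    have e1 : PySem.List.pyGet? inds i = some (inds.getD i.toNat []) := by
      rw [PySem.List.pyGet?_of_nonneg _ h0, List.getElem?_eq_getElem h1,
          List.getD_eq_getElem _ _ h1]
    have e2 : PySem.List.pyGet? fits i = some (fits.getD i.toNat 0) := by
      rw [PySem.List.pyGet?_of_nonneg _ h0, List.getElem?_eq_getElem h2,
          List.getD_eq_getElem _ _ h2]
    rw [List.foldl_cons, List.foldl_cons]
    simp only [Option.bind_some, e1, e2, Option.map_some]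
    exact ih (fun j hj => hl j (by simp [hj])) _

lemma dictItems (inds : List (List Int)) (fits : List Int) :
    ((PySem.List.pyRange 0 (inds.length : Int) 1).foldl
       (fun d i => d.insert i (inds.getD i.toNat [], fits.getD i.toNat 0))
       PySem.Dict.empty).items = aItems inds fits := by
  have h := PySem.Dict.items_foldl_insert_fresh
    (l := PySem.List.pyRange 0 (inds.length : Int) 1) (k := fun i => i)
    (v := fun i => (inds.getD i.toNat [], fits.getD i.toNat 0))
    (d := PySem.Dict.empty)
    (fun a _ => PySem.Dict.contains_empty a)
    (by simpa using PySem.List.nodup_pyRange_one 0 (inds.length : Int))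
  simpa [aItems, PySem.List.pyRange_zero_nat, List.map_map, Function.comp] using h

lemma takeLoop (r : List (Int × (List Int × Int))) (mu : Nat) (h : mu ≤ r.length) :
    (PySem.List.pyRange 0 (mu : Int) 1).foldl
      (fun acc i => acc.bind fun pf =>
        (PySem.List.pyGet? r i).map fun it => (pf.1 ++ [it.2.1], pf.2 ++ [it.2.2]))
      (some (([] : List (List Int)), ([] : List Int)))
    = some ((r.take mu).map (fun it => it.2.1), (r.take mu).map (fun it => it.2.2)) := by
  induction mu with
  | zero => simp [PySem.List.pyRange_one_eq_nil]
  | succ m ih =>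
    have hm : m ≤ r.length := by omega
    have hlt : m < r.length := by omega
    rw [show ((m + 1 : Nat) : Int) = (m : Int) + 1 by push_cast; ring,
        PySem.List.pyRange_one_succ_right (by positivity), List.foldl_append, ih hm,
        List.foldl_cons, List.foldl_nil]
    have e : PySem.List.pyGet? r ((m : Nat) : Int) = some (r.getD m ((0 : Int), ([], 0))) := by
      rw [PySem.List.pyGet?_natCast, List.getElem?_eq_getElem hlt,
          List.getD_eq_getElem _ _ hlt]
    have ht : r.take (m + 1) = r.take m ++ [r[m]] := by
      rw [List.take_succ, List.getElem?_eq_getElem hlt]; rfl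
    rw [e]
    simp only [Option.bind_some, Option.map_some]
    rw [ht, List.map_append, List.map_append]
    simp [List.getElem?_eq_getElem hlt]

lemma bFoldPure (mu : Nat) (inds : List (List Int)) (fits : List Int)
    (h : inds.length ≤ fits.length) :
    (PySem.List.pyRange 0 (PySem.List.len inds) 1).foldl
      (fun best i =>
        match PySem.List.pyGet? fits i with
        | none => best
        | some f => bStep mu best (f, PySem.List.pyGetD inds i []))
      []
    = ((aItems inds fits).map hconv).foldl (bStep mu) [] := by
  unfold aItems
  rw [PySem.List.len_eq, PySem.List.pyRange_zero_nat, List.foldl_map,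
      List.map_map, List.foldl_map]
  apply PySem.List.foldl_congr_mem
  intro acc k hk
  have hk' : k < inds.length := List.mem_range.1 hk
  have e : PySem.List.pyGet? fits ((k : Nat) : Int) = some (fits.getD k 0) := by
    rw [PySem.List.pyGet?_natCast, List.getElem?_eq_getElem (by omega),
        List.getD_eq_getElem _ _ (by omega)]
  rw [e]
  simp [hconv, PySem.List.pyGetD_natCast]

-- the two results, assembled
lemma main_eq (current_pop : List (List Int)) (current_fitness : List Int)
    (offspring : List (List Int)) (offspring_fitness : List Int)
    (hpre : current_pop.length + offspring.length
      ≤ current_fitness.length + offspring_fitness.length) :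
    mu_plus_lambda current_pop current_fitness offspring offspring_fitness
      = mu_plus_lambda_alt current_pop current_fitness offspring offspring_fitness := by
  have hlen : (current_pop ++ offspring).length ≤ (current_fitness ++ offspring_fitness).length := by
    simp; omega
  set inds := current_pop ++ offspring with hinds
  set fits := current_fitness ++ offspring_fitness with hfits
  set mu := current_pop.length with hmu
  have hmule : mu ≤ inds.length := by simp [hinds, hmu]
  -- A side
  have hA1 := optDictFold inds fits (PySem.List.pyRange 0 (inds.length : Int) 1)
    (fun i hi => by
      rcases PySem.List.mem_pyRange_one.1 hi with ⟨hi0, hi1⟩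
      refine ⟨hi0, by omega, by omega⟩)
    PySem.Dict.empty
  have hA2 := dictItems inds fits
  set R := PySem.List.sorted (aItems inds fits) (fun it => it.2.2) true with hR
  have hRlen : mu ≤ R.length := by
    simp only [hR, PySem.List.length_sorted, aItems, List.length_map, List.length_range]
    exact hmule
  have hA3 := takeLoop R mu hRlen
  have hA : mu_plus_lambda current_pop current_fitness offspring offspring_fitness
      = ((R.take mu).map (fun it => it.2.1), (R.take mu).map (fun it => it.2.2)) := by
    unfold mu_plus_lambda
    simp only [List.nil_append, PySem.List.len_eq, ← hinds, ← hfits, ← hmu]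
    rw [hA1]
    simp only [hA2, ← hR]
    rw [hA3]
  -- B side
  have hB : mu_plus_lambda_alt current_pop current_fitness offspring offspring_fitness
      = ((R.map hconv).take mu |>.map (fun e => e.2),
         (R.map hconv).take mu |>.map (fun e => e.1)) := by
    unfold mu_plus_lambda_alt
    simp only [← hinds, ← hfits, ← hmu]
    rw [bFoldPure mu inds fits hlen, bMain, sorted_map_hconv, ← hR, ← List.map_take]
  rw [hA, hB, ← List.map_take, List.map_map, List.map_map]
  rfl

-- ===== VERDICT (by name: the statement is the Claim_ definition above) =====
theorem mu_plus_lambda_spec : Claim_equal_mu_plus_lambda := by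
  intro current_pop current_fitness offspring offspring_fitness _hdom hpre
  unfold Spec_mu_plus_lambda
  exact main_eq current_pop current_fitness offspring offspring_fitness hpre
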